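-- pv_equiv track=rewrite | github.com/ssfoley/DSLEUTH | visualization/venv/lib/python3.8/site-packages/arcgis/learn/_utils/pointcloud_data.py | calculate_per_class_stats
-- ===== SOURCE A (Python) =====
-- def calculate_per_class_stats(all_pred, all_y, total_classes):
--
--     true_positives = [0] * total_classes
--     false_positives = [0] * total_classes
--     false_negatives = [0] * total_classes
--     class_count = [0] * total_classes
--
--     for i in range(len(all_y)):
--         class_count[all_y[i]] += 1
--         false_positives[all_pred[i]] += int(all_y[i] != all_pred[i])
--         true_positives[all_pred[i]] += int(all_y[i] == all_pred[i])
--         false_negatives[all_y[i]] += int(all_y[i] != all_pred[i])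
--
--     return true_positives, false_positives, false_negatives
-- ===== SOURCE B (Python) =====
-- from collections import Counter
--
--
-- def calculate_per_class_stats(all_pred, all_y, total_classes):
--     true_positives = [0] * total_classes
--     false_positives = [0] * total_classes
--     false_negatives = [0] * total_classes
--
--     conf = Counter((all_pred[i], all_y[i]) for i in range(len(all_y)))
--
--     for (p, t), cnt in conf.items():
--         if p == t:
--             true_positives[p] += cnt
--         else:
--             false_positives[p] += cnt
--             false_negatives[t] += cnt
--
--     return true_positives, false_positives, false_negatives
-- ===== Notes on version B (the rewrite author's own statement) =====
-- stated objective: alternative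
-- what changed: B replaces A's single per-sample loop that increments four stat arrays with a two-phase aggregation: it first builds a Counter over distinct (pred, true) confusion pairs, then a second, differently-shaped pass over the distinct pairs adds each count to TP (diagonal) or to FP and FN (off-diagonal).
import Mathlib
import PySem

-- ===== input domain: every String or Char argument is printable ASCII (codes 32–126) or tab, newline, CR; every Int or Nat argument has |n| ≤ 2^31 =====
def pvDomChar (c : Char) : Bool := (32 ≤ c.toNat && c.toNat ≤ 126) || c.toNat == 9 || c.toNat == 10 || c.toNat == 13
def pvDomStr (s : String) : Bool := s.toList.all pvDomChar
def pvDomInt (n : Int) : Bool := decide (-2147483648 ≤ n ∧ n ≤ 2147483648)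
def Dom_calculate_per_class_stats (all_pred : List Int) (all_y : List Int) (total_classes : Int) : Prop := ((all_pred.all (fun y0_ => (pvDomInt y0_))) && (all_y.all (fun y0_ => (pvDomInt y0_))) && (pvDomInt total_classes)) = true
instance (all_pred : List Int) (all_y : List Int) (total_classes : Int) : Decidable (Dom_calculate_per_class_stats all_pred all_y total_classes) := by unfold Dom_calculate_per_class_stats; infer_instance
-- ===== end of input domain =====

-- B aggregates a Counter of (pred, true) confusion pairs first and distributes counts in a
-- second pass over distinct pairs, instead of A's single per-sample loop over four stat arrays.


-- ===== PORT A =====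
-- for i in range(len(all_y)): update class_count, false_positives, true_positives, false_negatives in place
def calculate_per_class_stats (all_pred : List Int) (all_y : List Int) (total_classes : Int) : List Int × List Int × List Int :=
  let tp0 : List Int := List.replicate total_classes.toNat 0
  let fp0 : List Int := List.replicate total_classes.toNat 0
  let fn0 : List Int := List.replicate total_classes.toNat 0
  let cc0 : List Int := List.replicate total_classes.toNat 0
  let st := (PySem.List.pyRange 0 (PySem.List.len all_y) 1).foldl
    (fun (s : List Int × List Int × List Int × List Int) i =>
      let y := PySem.List.pyGetD all_y i 0
      let p := PySem.List.pyGetD all_pred i 0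
      let cc := PySem.List.pySetD s.2.2.2 y (PySem.List.pyGetD s.2.2.2 y 0 + 1)
      let fp := PySem.List.pySetD s.2.1 p (PySem.List.pyGetD s.2.1 p 0 + (if y ≠ p then 1 else 0))
      let tp := PySem.List.pySetD s.1 p (PySem.List.pyGetD s.1 p 0 + (if y = p then 1 else 0))
      let fn := PySem.List.pySetD s.2.2.1 y (PySem.List.pyGetD s.2.2.1 y 0 + (if y ≠ p then 1 else 0))
      (tp, fp, fn, cc))
    (tp0, fp0, fn0, cc0)
  (st.1, st.2.1, st.2.2.1)

-- ===== PORT B =====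
-- conf = Counter((all_pred[i], all_y[i]) for i in range(len(all_y))); then one pass over conf.items()
def calculate_per_class_stats_alt (all_pred : List Int) (all_y : List Int) (total_classes : Int) : List Int × List Int × List Int :=
  let tp0 : List Int := List.replicate total_classes.toNat 0
  let fp0 : List Int := List.replicate total_classes.toNat 0
  let fn0 : List Int := List.replicate total_classes.toNat 0
  let conf := PySem.Dict.counter ((PySem.List.pyRange 0 (PySem.List.len all_y) 1).map
    (fun i => (PySem.List.pyGetD all_pred i 0, PySem.List.pyGetD all_y i 0)))
  conf.items.foldl
    (fun (s : List Int × List Int × List Int) kc =>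
      if kc.1.1 = kc.1.2 then
        (PySem.List.pySetD s.1 kc.1.1 (PySem.List.pyGetD s.1 kc.1.1 0 + kc.2), s.2.1, s.2.2)
      else
        (s.1,
         PySem.List.pySetD s.2.1 kc.1.1 (PySem.List.pyGetD s.2.1 kc.1.1 0 + kc.2),
         PySem.List.pySetD s.2.2 kc.1.2 (PySem.List.pyGetD s.2.2 kc.1.2 0 + kc.2)))
    (tp0, fp0, fn0)

-- ===== PRECONDITION & SPEC =====
-- Pre_ = exactly the inputs on which the Python A returns (no IndexError): all_pred is long enough,
-- and every class id read by the loop is a valid Python index into the length-total_classes lists.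
def Pre_calculate_per_class_stats (all_pred : List Int) (all_y : List Int) (total_classes : Int) : Prop :=
  all_y.length ≤ all_pred.length ∧
  (∀ v ∈ all_y, -total_classes ≤ v ∧ v < total_classes) ∧
  (∀ v ∈ all_pred.take all_y.length, -total_classes ≤ v ∧ v < total_classes)
instance (all_pred : List Int) (all_y : List Int) (total_classes : Int) : Decidable (Pre_calculate_per_class_stats all_pred all_y total_classes) := by unfold Pre_calculate_per_class_stats; infer_instance

def pvWitness_calculate_per_class_stats : List Int × List Int × Int := ([0, 1, 1], [0, 1, 0], 2)

def Spec_calculate_per_class_stats (all_pred : List Int) (all_y : List Int) (total_classes : Int) (out : List Int × List Int × List Int) : Prop := out = calculate_per_class_stats_alt all_pred all_y total_classes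
instance (all_pred : List Int) (all_y : List Int) (total_classes : Int) (out : List Int × List Int × List Int) : Decidable (Spec_calculate_per_class_stats all_pred all_y total_classes out) := by unfold Spec_calculate_per_class_stats; infer_instance

-- ===== CLAIM (what is proved, stated in full; the proofs are below) =====
def Claim_equal_calculate_per_class_stats : Prop := ∀ (all_pred : List Int) (all_y : List Int) (total_classes : Int), Dom_calculate_per_class_stats all_pred all_y total_classes → Pre_calculate_per_class_stats all_pred all_y total_classes → Spec_calculate_per_class_stats all_pred all_y total_classes (calculate_per_class_stats all_pred all_y total_classes)

-- ===== LEMMAS AND PROOFS =====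

-- Python's wrapped index for v with -m ≤ v < m
def pvWrap (m : Nat) (v : Int) : Nat := if v < 0 then (v + m).toNat else v.toNat

-- one in-place increment  l[v] += d  (Python index semantics)
def pvBump (l : List Int) (v d : Int) : List Int :=
  PySem.List.pySetD l v (PySem.List.pyGetD l v 0 + d)

theorem pvWrap_lt {m : Nat} {v : Int} (h : PySem.Raise.InRange m v) : pvWrap m v < m := by
  obtain ⟨h1, h2⟩ := h; unfold pvWrap; split <;> omega

theorem pySetD_wrap {l : List Int} {v : Int} (h : PySem.Raise.InRange l.length v) (w : Int) :
    PySem.List.pySetD l v w = l.set (pvWrap l.length v) w := by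
  obtain ⟨h1, h2⟩ := h
  simp only [PySem.List.pySetD, PySem.List.pySet?, PySem.List.pyIdx?, pvWrap]
  by_cases hv : v < 0
  · rw [if_neg (by omega), if_pos (by omega), if_pos hv]
    simp only [Option.map_some, Option.getD_some]
    congr 1
    omega
  · rw [if_pos (by omega), if_pos (by omega), if_neg hv]
    simp

theorem pyGetD_wrap {l : List Int} {v : Int} (h : PySem.Raise.InRange l.length v) :
    PySem.List.pyGetD l v 0 = l.getD (pvWrap l.length v) 0 := by
  obtain ⟨h1, h2⟩ := h
  simp only [PySem.List.pyGetD, PySem.List.pyGet?, PySem.List.pyIdx?, pvWrap]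
  by_cases hv : v < 0
  · rw [if_neg (by omega), if_pos (by omega), if_pos hv]
    simp only [Option.bind]
    rw [List.getD_eq_getElem?_getD]
    congr 2
    omega
  · rw [if_pos (by omega), if_pos (by omega), if_neg hv]
    simp [List.getD_eq_getElem?_getD]

theorem length_pvBump (l : List Int) (v d : Int) : (pvBump l v d).length = l.length := by
  simp [pvBump, PySem.List.length_pySetD]

theorem getD_pvBump {l : List Int} {v : Int} (h : PySem.Raise.InRange l.length v) (d : Int) (j : Nat) :
    (pvBump l v d).getD j 0 = if pvWrap l.length v = j then l.getD j 0 + d else l.getD j 0 := by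
  rw [pvBump, pySetD_wrap h, pyGetD_wrap h]
  have hk := pvWrap_lt h
  simp only [List.getD_eq_getElem?_getD, List.getElem?_set]
  split_ifs with he <;> simp [he]

theorem pvBump_zero {l : List Int} {v : Int} (h : PySem.Raise.InRange l.length v) :
    pvBump l v 0 = l := by
  rw [pvBump, add_zero, pySetD_wrap h, pyGetD_wrap h]
  have hk := pvWrap_lt h
  rw [List.getD_eq_getElem _ _ hk, List.set_getElem_self]

theorem pvBump_foldl_length (L : List (Int × Int)) (init : List Int) :
    (L.foldl (fun l x => pvBump l x.1 x.2) init).length = init.length := by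
  induction L generalizing init with
  | nil => rfl
  | cons a t ih => rw [List.foldl_cons, ih, length_pvBump]

theorem pvBump_foldl_getD (L : List (Int × Int)) (init : List Int)
    (h : ∀ x ∈ L, PySem.Raise.InRange init.length x.1) (j : Nat) :
    (L.foldl (fun l x => pvBump l x.1 x.2) init).getD j 0
      = init.getD j 0 + (L.map (fun x => if pvWrap init.length x.1 = j then x.2 else 0)).sum := by
  induction L generalizing init with
  | nil => simp
  | cons a t ih =>
    have ha := h a (by simp)
    have hlen : (pvBump init a.1 a.2).length = init.length := length_pvBump ..
    rw [List.foldl_cons, ih _ (by intro x hx; rw [hlen]; exact h x (by simp [hx])),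
        getD_pvBump ha, List.map_cons, List.sum_cons, hlen]
    split_ifs <;> ring

theorem foldl_ite_pvBump {α : Type} (L : List α) (c : α → Prop) [DecidablePred c]
    (k v : α → Int) (init : List Int)
    (h : ∀ x ∈ L, PySem.Raise.InRange init.length (k x)) :
    L.foldl (fun l x => if c x then pvBump l (k x) (v x) else l) init
      = L.foldl (fun l x => pvBump l (k x) (if c x then v x else 0)) init := by
  induction L generalizing init with
  | nil => rfl
  | cons a t ih =>
    have ha := h a (by simp)
    have hstep : (if c a then pvBump init (k a) (v a) else init)
        = pvBump init (k a) (if c a then v a else 0) := by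
      split_ifs with hc
      · rfl
      · exact (pvBump_zero ha).symm
    rw [List.foldl_cons, List.foldl_cons, hstep]
    exact ih _ (by intro x hx; rw [length_pvBump]; exact h x (by simp [hx]))

theorem count_beq_indep {α : Type} [inst1 : BEq α] [LawfulBEq α] [inst2 : DecidableEq α]
    (x : α) (l : List α) :
    @List.count α inst1 x l = @List.count α instBEqOfDecidableEq x l := by
  induction l with
  | nil => rfl
  | cons a t ih =>
    rw [@List.count_cons α inst1, @List.count_cons α instBEqOfDecidableEq, ih]
    by_cases h : a = x <;> simp [h]

theorem sum_map_eq_sum_dedup {α : Type} [BEq α] [LawfulBEq α] [DecidableEq α]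
    (l : List α) (g : α → Int) :
    (l.map g).sum = ((PySem.Set.ofList l).map (fun k => (l.count k : Int) * g k)).sum := by
  rw [Finset.sum_list_map_count, ← List.sum_toFinset _ (PySem.Set.nodup_ofList l)]
  apply Finset.sum_congr
  · ext x; simp [PySem.Set.mem_ofList]
  · intro x _; rw [nsmul_eq_mul, count_beq_indep x l]

-- A's fold, projected component by component into independent pvBump folds
theorem foldA_proj (all_pred all_y : List Int) (idx : List Int) (tp fp fn cc : List Int) :
    idx.foldl
      (fun (s : List Int × List Int × List Int × List Int) i =>
        let y := PySem.List.pyGetD all_y i 0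
        let p := PySem.List.pyGetD all_pred i 0
        let cc := PySem.List.pySetD s.2.2.2 y (PySem.List.pyGetD s.2.2.2 y 0 + 1)
        let fp := PySem.List.pySetD s.2.1 p (PySem.List.pyGetD s.2.1 p 0 + (if y ≠ p then 1 else 0))
        let tp := PySem.List.pySetD s.1 p (PySem.List.pyGetD s.1 p 0 + (if y = p then 1 else 0))
        let fn := PySem.List.pySetD s.2.2.1 y (PySem.List.pyGetD s.2.2.1 y 0 + (if y ≠ p then 1 else 0))
        (tp, fp, fn, cc))
      (tp, fp, fn, cc)
    = (idx.foldl (fun l i => pvBump l (PySem.List.pyGetD all_pred i 0)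
          (if PySem.List.pyGetD all_y i 0 = PySem.List.pyGetD all_pred i 0 then 1 else 0)) tp,
       idx.foldl (fun l i => pvBump l (PySem.List.pyGetD all_pred i 0)
          (if PySem.List.pyGetD all_y i 0 ≠ PySem.List.pyGetD all_pred i 0 then 1 else 0)) fp,
       idx.foldl (fun l i => pvBump l (PySem.List.pyGetD all_y i 0)
          (if PySem.List.pyGetD all_y i 0 ≠ PySem.List.pyGetD all_pred i 0 then 1 else 0)) fn,
       idx.foldl (fun l i => pvBump l (PySem.List.pyGetD all_y i 0) 1) cc) := by
  induction idx generalizing tp fp fn cc with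
  | nil => rfl
  | cons a t ih => simp only [List.foldl_cons]; exact ih _ _ _ _

-- B's fold, projected component by component
theorem foldB_proj (items : List ((Int × Int) × Int)) (tp fp fn : List Int) :
    items.foldl
      (fun (s : List Int × List Int × List Int) kc =>
        if kc.1.1 = kc.1.2 then
          (PySem.List.pySetD s.1 kc.1.1 (PySem.List.pyGetD s.1 kc.1.1 0 + kc.2), s.2.1, s.2.2)
        else
          (s.1,
           PySem.List.pySetD s.2.1 kc.1.1 (PySem.List.pyGetD s.2.1 kc.1.1 0 + kc.2),
           PySem.List.pySetD s.2.2 kc.1.2 (PySem.List.pyGetD s.2.2 kc.1.2 0 + kc.2)))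
      (tp, fp, fn)
    = (items.foldl (fun l kc => if kc.1.1 = kc.1.2 then pvBump l kc.1.1 kc.2 else l) tp,
       items.foldl (fun l kc => if ¬ kc.1.1 = kc.1.2 then pvBump l kc.1.1 kc.2 else l) fp,
       items.foldl (fun l kc => if ¬ kc.1.1 = kc.1.2 then pvBump l kc.1.2 kc.2 else l) fn) := by
  induction items generalizing tp fp fn with
  | nil => rfl
  | cons a t ih =>
    simp only [List.foldl_cons]
    by_cases h : a.1.1 = a.1.2 <;> simp only [h, if_pos, ite_false] <;>
      [exact ih _ _ _; exact ih _ _ _]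

theorem component_eq (pairs : List (Int × Int)) (R : List Int)
    (key : Int × Int → Int) (hkey : ∀ pt ∈ pairs, PySem.Raise.InRange R.length (key pt))
    (cA cB : Int × Int → Prop) [DecidablePred cA] [DecidablePred cB]
    (hc : ∀ pt, cA pt ↔ cB pt) :
    pairs.foldl (fun l pt => pvBump l (key pt) (if cA pt then 1 else 0)) R
      = ((PySem.Set.ofList pairs).map (fun k => (k, (pairs.count k : Int)))).foldl
          (fun l kc => if cB kc.1 then pvBump l (key kc.1) kc.2 else l) R := by
  have hmemI : ∀ kc ∈ (PySem.Set.ofList pairs).map (fun k => (k, (pairs.count k : Int))),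
      kc.1 ∈ pairs := by
    intro kc hkc
    obtain ⟨k, hk, rfl⟩ := List.mem_map.1 hkc
    exact (PySem.Set.mem_ofList _ _).1 hk
  rw [foldl_ite_pvBump _ (fun kc => cB kc.1) (fun kc => key kc.1) (fun kc => kc.2) R
      (fun x hx => hkey _ (hmemI x hx))]
  have hA : pairs.foldl (fun l pt => pvBump l (key pt) (if cA pt then 1 else 0)) R
      = (pairs.map (fun pt => (key pt, if cA pt then (1:Int) else 0))).foldl
          (fun l x => pvBump l x.1 x.2) R :=
    (List.foldl_map (f := fun pt => (key pt, if cA pt then (1:Int) else 0))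
      (g := fun l x => pvBump l x.1 x.2)).symm
  have hB : ((PySem.Set.ofList pairs).map (fun k => (k, (pairs.count k : Int)))).foldl
        (fun l kc => pvBump l (key kc.1) (if cB kc.1 then kc.2 else 0)) R
      = (((PySem.Set.ofList pairs).map (fun k => (k, (pairs.count k : Int)))).map
          (fun (kc : (Int × Int) × Int) => (key kc.1, if cB kc.1 then kc.2 else 0))).foldl
          (fun l x => pvBump l x.1 x.2) R :=
    (List.foldl_map (f := fun (kc : (Int × Int) × Int) => (key kc.1, if cB kc.1 then kc.2 else 0))
      (g := fun l x => pvBump l x.1 x.2)).symm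
  rw [hA, hB]
  have hInA : ∀ x ∈ pairs.map (fun pt => (key pt, if cA pt then (1:Int) else 0)),
      PySem.Raise.InRange R.length x.1 := by
    intro x hx; obtain ⟨pt, hpt, rfl⟩ := List.mem_map.1 hx; exact hkey pt hpt
  have hInB : ∀ x ∈ (((PySem.Set.ofList pairs).map (fun k => (k, (pairs.count k : Int)))).map
      (fun (kc : (Int × Int) × Int) => (key kc.1, if cB kc.1 then kc.2 else 0))), PySem.Raise.InRange R.length x.1 := by
    intro x hx; obtain ⟨kc, hkc, rfl⟩ := List.mem_map.1 hx; exact hkey _ (hmemI kc hkc)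
  apply List.ext_getElem
  · rw [pvBump_foldl_length, pvBump_foldl_length]
  · intro j hj1 hj2
    rw [← List.getD_eq_getElem _ 0 hj1, ← List.getD_eq_getElem _ 0 hj2,
        pvBump_foldl_getD _ _ hInA j, pvBump_foldl_getD _ _ hInB j]
    congr 1
    rw [List.map_map, List.map_map, List.map_map]
    simp only [Function.comp_def]
    rw [sum_map_eq_sum_dedup pairs
      (fun pt => if pvWrap R.length (key pt) = j then (if cA pt then (1:Int) else 0) else 0)]
    congr 1
    apply List.map_congr_left
    intro k _
    rcases em (cA k) with h1 | h1
    · have h1' := (hc k).1 h1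
      by_cases h2 : pvWrap R.length (key k) = j <;> simp [h1, h1', h2]
    · have h1' : ¬ cB k := fun hcb => h1 ((hc k).2 hcb)
      by_cases h2 : pvWrap R.length (key k) = j <;> simp [h1, h1', h2]

-- ===== VERDICT is at the bottom =====

theorem calculate_per_class_stats_spec : Claim_equal_calculate_per_class_stats := by
  intro all_pred all_y total_classes _hdom hpre
  obtain ⟨hlen, hy, hp⟩ := hpre
  simp only [Spec_calculate_per_class_stats, calculate_per_class_stats,
    calculate_per_class_stats_alt]
  rw [foldA_proj, foldB_proj, PySem.Dict.items_counter]
  have hkeyT : ∀ pt ∈ (PySem.List.pyRange 0 (PySem.List.len all_y) 1).map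
      (fun i => (PySem.List.pyGetD all_pred i 0, PySem.List.pyGetD all_y i 0)),
      PySem.Raise.InRange (List.replicate total_classes.toNat (0:Int)).length pt.2 := by
    intro pt hpt
    obtain ⟨i, hi, rfl⟩ := List.mem_map.1 hpt
    rw [PySem.List.mem_pyRange_one] at hi
    rw [PySem.List.len_eq] at hi
    have hmem : PySem.List.pyGetD all_y i 0 ∈ all_y :=
      PySem.List.pyGetD_mem all_y 0 ⟨by omega, by omega⟩
    have hb := hy _ hmem
    rw [List.length_replicate]
    exact ⟨by omega, by omega⟩
  have hkeyP : ∀ pt ∈ (PySem.List.pyRange 0 (PySem.List.len all_y) 1).map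
      (fun i => (PySem.List.pyGetD all_pred i 0, PySem.List.pyGetD all_y i 0)),
      PySem.Raise.InRange (List.replicate total_classes.toNat (0:Int)).length pt.1 := by
    intro pt hpt
    obtain ⟨i, hi, rfl⟩ := List.mem_map.1 hpt
    rw [PySem.List.mem_pyRange_one] at hi
    rw [PySem.List.len_eq] at hi
    have hilen : i < (all_pred.length : Int) := by
      have := hlen; omega
    have hg : PySem.List.pyGetD all_pred i 0 = all_pred[i.toNat]'(by omega) :=
      PySem.List.pyGetD_eq_getElem all_pred 0 hi.1 hilen
    have htk : all_pred[i.toNat]'(by omega) ∈ all_pred.take all_y.length := by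
      have hlt : i.toNat < all_y.length := by omega
      have hlen2 : i.toNat < (all_pred.take all_y.length).length := by
        simp [List.length_take]; omega
      have he : (all_pred.take all_y.length)[i.toNat]'hlen2 = all_pred[i.toNat]'(by omega) := by
        simp [List.getElem_take]
      rw [← he]; exact List.getElem_mem hlen2
    have hb := hp _ (hg ▸ htk)
    rw [List.length_replicate]
    exact ⟨by omega, by omega⟩
  refine Prod.ext ?_ (Prod.ext ?_ ?_)
  · have hA1 : (PySem.List.pyRange 0 (PySem.List.len all_y) 1).foldl
        (fun l i => pvBump l (PySem.List.pyGetD all_pred i 0)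
          (if PySem.List.pyGetD all_y i 0 = PySem.List.pyGetD all_pred i 0 then 1 else 0))
        (List.replicate total_classes.toNat 0)
      = ((PySem.List.pyRange 0 (PySem.List.len all_y) 1).map
          (fun i => (PySem.List.pyGetD all_pred i 0, PySem.List.pyGetD all_y i 0))).foldl
          (fun l pt => pvBump l pt.1 (if pt.2 = pt.1 then 1 else 0))
          (List.replicate total_classes.toNat 0) :=
      (List.foldl_map (f := fun i => (PySem.List.pyGetD all_pred i 0, PySem.List.pyGetD all_y i 0))
        (g := fun l pt => pvBump l pt.1 (if pt.2 = pt.1 then 1 else 0))).symm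
    rw [hA1]
    exact component_eq _ _ (fun pt => pt.1) hkeyP (fun pt => pt.2 = pt.1) (fun pt => pt.1 = pt.2)
      (fun pt => eq_comm)
  · have hA2 : (PySem.List.pyRange 0 (PySem.List.len all_y) 1).foldl
        (fun l i => pvBump l (PySem.List.pyGetD all_pred i 0)
          (if PySem.List.pyGetD all_y i 0 ≠ PySem.List.pyGetD all_pred i 0 then 1 else 0))
        (List.replicate total_classes.toNat 0)
      = ((PySem.List.pyRange 0 (PySem.List.len all_y) 1).map
          (fun i => (PySem.List.pyGetD all_pred i 0, PySem.List.pyGetD all_y i 0))).foldl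
          (fun l pt => pvBump l pt.1 (if pt.2 ≠ pt.1 then 1 else 0))
          (List.replicate total_classes.toNat 0) :=
      (List.foldl_map (f := fun i => (PySem.List.pyGetD all_pred i 0, PySem.List.pyGetD all_y i 0))
        (g := fun l pt => pvBump l pt.1 (if pt.2 ≠ pt.1 then 1 else 0))).symm
    rw [hA2]
    exact component_eq _ _ (fun pt => pt.1) hkeyP (fun pt => pt.2 ≠ pt.1) (fun pt => ¬ pt.1 = pt.2)
      (fun pt => ne_comm)
  · have hA3 : (PySem.List.pyRange 0 (PySem.List.len all_y) 1).foldl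
        (fun l i => pvBump l (PySem.List.pyGetD all_y i 0)
          (if PySem.List.pyGetD all_y i 0 ≠ PySem.List.pyGetD all_pred i 0 then 1 else 0))
        (List.replicate total_classes.toNat 0)
      = ((PySem.List.pyRange 0 (PySem.List.len all_y) 1).map
          (fun i => (PySem.List.pyGetD all_pred i 0, PySem.List.pyGetD all_y i 0))).foldl
          (fun l pt => pvBump l pt.2 (if pt.2 ≠ pt.1 then 1 else 0))
          (List.replicate total_classes.toNat 0) :=
      (List.foldl_map (f := fun i => (PySem.List.pyGetD all_pred i 0, PySem.List.pyGetD all_y i 0))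
        (g := fun l pt => pvBump l pt.2 (if pt.2 ≠ pt.1 then 1 else 0))).symm
    rw [hA3]
    exact component_eq _ _ (fun pt => pt.2) hkeyT (fun pt => pt.2 ≠ pt.1) (fun pt => ¬ pt.1 = pt.2)
      (fun pt => ne_comm)
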